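-- pv_equiv track=rewrite | github.com/Pranitraj1/DSA_QUESTION | Array/countPosNegZero.py | countPosNegZero
-- ===== SOURCE A (Python) =====
-- def countPosNegZero(nums):
--     positive_count = 0
--     negative_count = 0
--     zero_count = 0
--     for i in nums:
--         if i > 0:
--             positive_count = positive_count + 1
--         elif i < 0:
--             negative_count = negative_count + 1
--         else:
--             zero_count = zero_count + 1
--
--     return (positive_count, negative_count, zero_count)
-- ===== SOURCE B (Python) =====
-- def countPosNegZero(nums):
--     nums = list(nums)
--     positive_count = sum(1 for i in nums if i > 0)
--     negative_count = sum(1 for i in nums if i < 0)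
--     zero_count = sum(1 for i in nums if not (i > 0 or i < 0))
--     return (positive_count, negative_count, zero_count)
-- ===== Notes on version B (the rewrite author's own statement) =====
-- stated objective: simpler
-- what changed: Replaces the single stateful if/elif/else accumulator loop with three independent filtered-count passes over the list.
import Mathlib
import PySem

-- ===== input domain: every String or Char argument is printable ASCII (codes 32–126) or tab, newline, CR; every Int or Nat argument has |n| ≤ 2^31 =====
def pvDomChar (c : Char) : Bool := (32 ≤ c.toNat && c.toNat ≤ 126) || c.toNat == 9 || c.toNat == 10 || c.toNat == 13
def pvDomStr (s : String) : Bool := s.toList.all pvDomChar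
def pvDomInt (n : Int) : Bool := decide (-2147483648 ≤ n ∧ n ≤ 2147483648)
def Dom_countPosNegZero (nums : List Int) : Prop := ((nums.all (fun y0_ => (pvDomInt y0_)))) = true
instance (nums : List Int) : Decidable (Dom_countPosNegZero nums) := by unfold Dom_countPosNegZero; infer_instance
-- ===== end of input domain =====

-- B replaces A's single if/elif/else accumulator loop with three independent filtered-count passes (objective: simpler).
-- ===== PORT A =====
def countPosNegZero (nums : List Int) : Int × Int × Int :=
  let s := nums.foldl (fun (acc : Int × Int × Int) i =>
    if i > 0 then (acc.1 + 1, acc.2.1, acc.2.2)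
    else if i < 0 then (acc.1, acc.2.1 + 1, acc.2.2)
    else (acc.1, acc.2.1, acc.2.2 + 1)) (0, 0, 0)
  s

-- ===== PORT B =====
def countPosNegZero_alt (nums : List Int) : Int × Int × Int :=
  let positive_count : Int := ((nums.filter (fun i => i > 0)).length : Int)
  let negative_count : Int := ((nums.filter (fun i => i < 0)).length : Int)
  let zero_count : Int := ((nums.filter (fun i => !(i > 0 || i < 0))).length : Int)
  (positive_count, negative_count, zero_count)

-- ===== PRECONDITION & SPEC =====
def Spec_countPosNegZero (nums : List Int) (out : Int × Int × Int) : Prop := out = countPosNegZero_alt nums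
instance (nums : List Int) (out : Int × Int × Int) : Decidable (Spec_countPosNegZero nums out) := by unfold Spec_countPosNegZero; infer_instance

-- ===== CLAIM (what is proved, stated in full; the proofs are below) =====
def Claim_equal_countPosNegZero : Prop := ∀ (nums : List Int), Dom_countPosNegZero nums → Spec_countPosNegZero nums (countPosNegZero nums)

-- ===== LEMMAS AND PROOFS =====

-- ===== VERDICT (by name: the statement is the Claim_ definition above) =====
-- loop characterisation: the fold from an arbitrary start adds the three filter counts
theorem foldl_char (xs : List Int) (a b c : Int) :
    xs.foldl (fun (acc : Int × Int × Int) i =>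
      if i > 0 then (acc.1 + 1, acc.2.1, acc.2.2)
      else if i < 0 then (acc.1, acc.2.1 + 1, acc.2.2)
      else (acc.1, acc.2.1, acc.2.2 + 1)) (a, b, c)
    = (a + ((xs.filter (fun i => i > 0)).length : Int),
       b + ((xs.filter (fun i => i < 0)).length : Int),
       c + ((xs.filter (fun i => !(i > 0 || i < 0))).length : Int)) := by
  induction xs generalizing a b c with
  | nil => simp
  | cons x xs ih =>
    simp only [List.foldl_cons, List.filter_cons]
    rcases lt_trichotomy x 0 with h | h | h
    · have h1 : ¬ (x > 0) := by omega
      simp only [ih]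
      simp [h, h1]
      omega
    · subst h
      simp only [ih]
      simp
      omega
    · simp only [ih]
      simp [h, not_lt.mpr h.le]
      omega

theorem countPosNegZero_spec : Claim_equal_countPosNegZero := by
  intro nums _
  show countPosNegZero nums = countPosNegZero_alt nums
  simp only [countPosNegZero, countPosNegZero_alt, foldl_char]
  simp
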